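-- pv_equiv track=rewrite | github.com/fias06/comp | third/main.py | get_neighbour_positions
-- ===== SOURCE A (Python) =====
-- def is_valid_position(board, row, col):
--     """
--     this function checks if the given coordinates actually exist
--     in the board or not
--
--     Examples:
--     for board = init_board(4,5,1)
--
--     1)
--     >>> is_valid_position(board,0,0)
--     returns True
--
--     2)
--     >>> is_valid_position(board,-3,2)
--     returns Falso
--
--     3)
--     >>> is_valid_position(board,4,5)
--     returns False
--
--     """
--     #checks position of row/col
--     row_count, col_count = len(board), len(board[0])
--
--     if 0<= row <row_count and 0<= col <col_count: #main condition
--         return True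
--     else:
--         return False
--
-- def get_neighbour_positions(board, row, col):
--     """
--     this function gives the positions of the neighbouring
--     elements if they exist
--
--     Examples:
--     if board = init_board(3,4,0)
--     1)
--     >>> get_neighbour_positions(board,1,2)
--     returns [[0, 1],[0, 2],[0, 3],[1, 1],[1, 3],[2, 1],[2, 2],[2, 3]]
--
--     2)
--     >>> get_neighbour_positions(board,0,0)
--     returns [[0, 1], [1, 0], [1, 1]]
--
--     3)
--     get_neighbour_positions(board, 2,3)
--     returns [[1, 2], [1, 3], [2, 2]]
--
--     """
--
--     neighbours = []
--     for i in [-1,0,1]: #for the nieghbouring positions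
--         for j in [-1,0,1]:
--             if not(i==0 and j==0):
--                 new_row = row+i #gives new row pos
--                 new_col = col+j #gives new col pos
--
--                 #checks if position actually exists
--                 if is_valid_position(board, new_row, new_col) == True:
--                     neighbours.append([new_row,new_col]) #adds to a list
--     return neighbours
-- ===== SOURCE B (Python) =====
-- def get_neighbour_positions(board, row, col):
--     rows, cols = len(board), len(board[0])
--     return [[r, c] for r in range(rows) for c in range(cols)
--             if max(abs(r - row), abs(c - col)) == 1]
-- ===== Notes on version B (the rewrite author's own statement) =====
-- stated objective: alternative
-- what changed: B scans every cell of the board in row-major order and keeps those at Chebyshev distance exactly 1 from (row,col), instead of enumerating the 8 offsets and bounds-checking each; it trades O(1) work for a distance-filtered full scan.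
import Mathlib
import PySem

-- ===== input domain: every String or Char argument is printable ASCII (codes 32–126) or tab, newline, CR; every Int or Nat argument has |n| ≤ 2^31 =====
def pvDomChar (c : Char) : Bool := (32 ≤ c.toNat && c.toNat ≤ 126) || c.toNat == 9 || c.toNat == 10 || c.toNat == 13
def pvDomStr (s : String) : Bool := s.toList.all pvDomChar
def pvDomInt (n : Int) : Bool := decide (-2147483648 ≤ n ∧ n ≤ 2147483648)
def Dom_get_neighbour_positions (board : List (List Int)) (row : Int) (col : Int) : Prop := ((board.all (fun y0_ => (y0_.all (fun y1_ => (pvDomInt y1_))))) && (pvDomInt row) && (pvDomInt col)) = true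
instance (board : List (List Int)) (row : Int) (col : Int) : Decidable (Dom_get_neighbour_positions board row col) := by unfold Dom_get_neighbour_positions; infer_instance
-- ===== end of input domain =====

-- B scans the whole board in row-major order and keeps the cells at Chebyshev distance exactly 1,
-- instead of enumerating the 8 offsets with a per-cell is_valid_position bounds check (objective: alternative).

-- ===== PORT A =====
-- board[0] is exact as board.headD [] because Pre_ restricts to board ≠ [] (Python raises IndexError on []).
def is_valid_position (board : List (List Int)) (row : Int) (col : Int) : Bool :=
  let row_count : Int := board.length
  let col_count : Int := (board.headD []).length
  if (0 ≤ row ∧ row < row_count) ∧ (0 ≤ col ∧ col < col_count) then true else false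

def get_neighbour_positions (board : List (List Int)) (row : Int) (col : Int) : List (List Int) :=
  let neighbours : List (List Int) := []
  [(-1 : Int), 0, 1].foldl (fun neighbours i =>
    [(-1 : Int), 0, 1].foldl (fun neighbours j =>
      if ¬(i = 0 ∧ j = 0) then
        let new_row := row + i
        let new_col := col + j
        if is_valid_position board new_row new_col = true then
          neighbours ++ [[new_row, new_col]]
        else neighbours
      else neighbours) neighbours) neighbours

-- ===== PORT B =====
-- board[0] is exact as board.headD [] because Pre_ restricts to board ≠ [].
-- The comprehension '[[r,c] for r in range(rows) for c in range(cols) if max(abs(r-row),abs(c-col))==1]'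
-- is ported as flatMap over the row range of (filter the column range, then map to [r,c]).
def get_neighbour_positions_alt (board : List (List Int)) (row : Int) (col : Int) : List (List Int) :=
  let rows : Int := board.length
  let cols : Int := (board.headD []).length
  (PySem.List.pyRange 0 rows 1).flatMap (fun r =>
    ((PySem.List.pyRange 0 cols 1).filter (fun c => decide (max |r - row| |c - col| = 1))).map
      (fun c => [r, c]))

-- ===== PRECONDITION & SPEC =====
-- Pre_ excludes exactly the empty board, on which the Python A raises IndexError at board[0].
def Pre_get_neighbour_positions (board : List (List Int)) (row : Int) (col : Int) : Prop := board ≠ []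
instance (board : List (List Int)) (row : Int) (col : Int) : Decidable (Pre_get_neighbour_positions board row col) := by unfold Pre_get_neighbour_positions; infer_instance
def pvWitness_get_neighbour_positions : List (List Int) × Int × Int := ([[0, 0], [0, 0]], 0, 1)

def Spec_get_neighbour_positions (board : List (List Int)) (row : Int) (col : Int) (out : List (List Int)) : Prop := out = get_neighbour_positions_alt board row col
instance (board : List (List Int)) (row : Int) (col : Int) (out : List (List Int)) : Decidable (Spec_get_neighbour_positions board row col out) := by unfold Spec_get_neighbour_positions; infer_instance

-- ===== CLAIM (what is proved, stated in full; the proofs are below) =====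
def Claim_equal_get_neighbour_positions : Prop := ∀ (board : List (List Int)) (row : Int) (col : Int), Dom_get_neighbour_positions board row col → Pre_get_neighbour_positions board row col → Spec_get_neighbour_positions board row col (get_neighbour_positions board row col)

-- ===== LEMMAS AND PROOFS =====

-- A filter of range(0,n) whose predicate picks exactly the members of a strictly increasing
-- literal list L equals L restricted to the in-bounds elements, in order.
theorem filter_range_eq (n : Int) (p : Int → Bool) (L : List Int)
    (hL : L.Pairwise (· < ·)) (h : ∀ a, p a = true ↔ a ∈ L) :
    (PySem.List.pyRange 0 n 1).filter p = L.filter (fun c => decide (0 ≤ c ∧ c < n)) := by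
  have hnd1 : ((PySem.List.pyRange 0 n 1).filter p).Nodup :=
    (PySem.List.nodup_pyRange_one _ _).filter _
  have hp1 : ((PySem.List.pyRange 0 n 1).filter p).Pairwise (· < ·) :=
    (PySem.List.pairwise_lt_pyRange_one _ _).filter _
  have hp2 : (L.filter (fun c => decide (0 ≤ c ∧ c < n))).Pairwise (· < ·) := hL.filter _
  have hperm : ((PySem.List.pyRange 0 n 1).filter p).Perm
      (L.filter (fun c => decide (0 ≤ c ∧ c < n))) := by
    rw [List.perm_ext_iff_of_nodup hnd1 hp2.nodup]
    intro a
    simp only [List.mem_filter, PySem.List.mem_pyRange_one, decide_eq_true_eq, h]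
    tauto
  exact List.Perm.eq_of_pairwise (by intro a b _ _ hab hba; omega) hp1 hp2 hperm

-- A flatMap may be restricted to the elements on which it is nonempty.
theorem flatMap_filter_nil {α β : Type} (l : List α) (p : α → Bool) (f : α → List β)
    (h : ∀ a ∈ l, p a = false → f a = []) :
    l.flatMap f = (l.filter p).flatMap f := by
  induction l with
  | nil => rfl
  | cons a l ih =>
    by_cases hp : p a = true
    · simp [hp, ih (fun a ha => h a (List.mem_cons_of_mem _ ha))]
    · have := h a (List.mem_cons_self) (by simpa using hp)
      simp [hp, this, ih (fun a ha => h a (List.mem_cons_of_mem _ ha))]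

-- A's nested loop, as a flatMap of filtered offset lists.
theorem A_flatMap (board : List (List Int)) (row col : Int) :
    get_neighbour_positions board row col
      = [(-1 : Int), 0, 1].flatMap (fun i =>
          ([(-1 : Int), 0, 1].filter (fun j =>
            decide (¬(i = 0 ∧ j = 0) ∧
              (0 ≤ row + i ∧ row + i < (board.length : Int)) ∧
              (0 ≤ col + j ∧ col + j < ((board.headD []).length : Int))))).map
            (fun j => [row + i, col + j])) := by
  have hin : ∀ (i : Int), i ∈ [(-1 : Int), 0, 1] → ∀ (nb : List (List Int)),
      List.foldl (fun (neighbours : List (List Int)) (j : Int) =>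
          if ¬(i = 0 ∧ j = 0) then
            if is_valid_position board (row + i) (col + j) = true then
              neighbours ++ [[row + i, col + j]]
            else neighbours
          else neighbours) nb [(-1 : Int), 0, 1]
        = nb ++ ([(-1 : Int), 0, 1].filter (fun j =>
            decide (¬(i = 0 ∧ j = 0) ∧
              (0 ≤ row + i ∧ row + i < (board.length : Int)) ∧
              (0 ≤ col + j ∧ col + j < ((board.headD []).length : Int))))).map
            (fun j => [row + i, col + j]) := by
    intro i _ nb
    rw [PySem.List.foldl_congr_mem' [(-1 : Int), 0, 1]
        (fun (neighbours : List (List Int)) (j : Int) =>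
          if ¬(i = 0 ∧ j = 0) then
            if is_valid_position board (row + i) (col + j) = true then
              neighbours ++ [[row + i, col + j]]
            else neighbours
          else neighbours)
        (fun (neighbours : List (List Int)) (j : Int) =>
          if (¬(i = 0 ∧ j = 0) ∧
              (0 ≤ row + i ∧ row + i < (board.length : Int)) ∧
              (0 ≤ col + j ∧ col + j < ((board.headD []).length : Int)))
          then neighbours ++ [[row + i, col + j]] else neighbours)
        nb ?_]
    · exact PySem.List.foldl_append_ite _ _ _ _
    · intro j _ nb
      by_cases h1 : (i = 0 ∧ j = 0) <;>
        by_cases h2 : ((0 ≤ row + i ∧ row + i < (board.length : Int)) ∧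
            (0 ≤ col + j ∧ col + j < ((board.headD []).length : Int))) <;>
        simp [is_valid_position, h1, h2]
  simp only [get_neighbour_positions]
  rw [PySem.List.foldl_congr_mem' [(-1 : Int), 0, 1]
      (fun (neighbours : List (List Int)) (i : Int) =>
        List.foldl (fun (neighbours : List (List Int)) (j : Int) =>
          if ¬(i = 0 ∧ j = 0) then
            if is_valid_position board (row + i) (col + j) = true then
              neighbours ++ [[row + i, col + j]]
            else neighbours
          else neighbours) neighbours [(-1 : Int), 0, 1])
      (fun (nb : List (List Int)) (i : Int) =>
        nb ++ ([(-1 : Int), 0, 1].filter (fun j =>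
            decide (¬(i = 0 ∧ j = 0) ∧
              (0 ≤ row + i ∧ row + i < (board.length : Int)) ∧
              (0 ≤ col + j ∧ col + j < ((board.headD []).length : Int))))).map
            (fun j => [row + i, col + j]))
      [] hin,
    PySem.List.foldl_append_eq_flatMap]
  simp

-- B's column filter for a row at vertical distance exactly 1.
theorem innerB_side (cols row col r : Int) (hr : |r - row| = 1) :
    (PySem.List.pyRange 0 cols 1).filter (fun c => decide (max |r - row| |c - col| = 1))
      = [col - 1, col, col + 1].filter (fun c => decide (0 ≤ c ∧ c < cols)) := by
  apply filter_range_eq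
  · simp
  · intro a; simp only [List.mem_cons, List.not_mem_nil, or_false, decide_eq_true_eq, hr,
      Int.abs_eq_natAbs]; omega

-- B's column filter on the center row.
theorem innerB_center (cols row col r : Int) (hr : r = row) :
    (PySem.List.pyRange 0 cols 1).filter (fun c => decide (max |r - row| |c - col| = 1))
      = [col - 1, col + 1].filter (fun c => decide (0 ≤ c ∧ c < cols)) := by
  apply filter_range_eq
  · simp
  · intro a; simp only [List.mem_cons, List.not_mem_nil, or_false, decide_eq_true_eq, hr,
      Int.abs_eq_natAbs]; omega

-- B's full-board scan, restricted to the three candidate rows.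
theorem B_flatMap (board : List (List Int)) (row col : Int) :
    get_neighbour_positions_alt board row col
      = ([row - 1, row, row + 1].filter (fun r => decide (0 ≤ r ∧ r < (board.length : Int)))).flatMap
          (fun r =>
            ((PySem.List.pyRange 0 ((board.headD []).length : Int) 1).filter
                (fun c => decide (max |r - row| |c - col| = 1))).map (fun c => [r, c])) := by
  simp only [get_neighbour_positions_alt]
  rw [flatMap_filter_nil (PySem.List.pyRange 0 (board.length : Int) 1)
      (fun r => decide (|r - row| ≤ 1)) _ ?_,
    filter_range_eq (board.length : Int) _ [row - 1, row, row + 1] (by simp)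
      (by intro a; simp only [List.mem_cons, List.not_mem_nil, or_false, decide_eq_true_eq,
        Int.abs_eq_natAbs]; omega)]
  intro r _ hr
  rw [List.filter_eq_nil_iff.mpr, List.map_nil]
  intro c _
  simp only [decide_eq_true_eq, decide_eq_false_iff_not, Int.abs_eq_natAbs] at hr ⊢
  omega

set_option maxHeartbeats 2000000 in
theorem get_neighbour_positions_spec : Claim_equal_get_neighbour_positions := by
  intro board row col _ _
  unfold Spec_get_neighbour_positions
  rw [A_flatMap, B_flatMap]
  have e1 : row + (-1 : Int) = row - 1 := by ring
  have e2 : row + (0 : Int) = row := by ring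
  have e4 : col + (-1 : Int) = col - 1 := by ring
  have e5 : col + (0 : Int) = col := by ring
  have s1 : |row - 1 - row| = (1 : Int) := by simp only [Int.abs_eq_natAbs]; omega
  have s3 : |row + 1 - row| = (1 : Int) := by simp only [Int.abs_eq_natAbs]; omega
  have i1 := innerB_side (((board.headD []).length : Int)) row col (row - 1) s1
  have i2 := innerB_center (((board.headD []).length : Int)) row col row rfl
  have i3 := innerB_side (((board.headD []).length : Int)) row col (row + 1) s3
  by_cases h1 : (0 ≤ row - 1 ∧ row - 1 < (board.length : Int)) <;>
    by_cases h2 : (0 ≤ row ∧ row < (board.length : Int)) <;>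
    by_cases h3 : (0 ≤ row + 1 ∧ row + 1 < (board.length : Int)) <;>
    [skip; skip; skip; skip; skip; skip; skip; skip] <;>
    simp only [List.filter_cons, List.filter_nil, h1, h2, h3, decide_eq_true_eq,
      and_self, true_and, and_true, if_true, if_false, decide_true, decide_false,
      Bool.false_eq_true,
      List.flatMap_cons, List.flatMap_nil] <;>
    (try simp only [i1, i2, i3]) <;>
    by_cases h4 : (0 ≤ col - 1 ∧ col - 1 < ((board.headD []).length : Int)) <;>
    by_cases h5 : (0 ≤ col ∧ col < ((board.headD []).length : Int)) <;>
    by_cases h6 : (0 ≤ col + 1 ∧ col + 1 < ((board.headD []).length : Int)) <;>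
    simp only [e1, e2, e4, e5, h1, h2, h3, h4, h5, h6,
      List.flatMap_cons, List.flatMap_nil, List.filter_cons, List.filter_nil,
      List.map_cons, List.map_nil, List.cons_append, List.nil_append, List.append_nil,
      decide_eq_true_eq, and_self, true_and, and_true, decide_true, decide_false, Bool.false_eq_true, if_true, if_false] <;>
    (try simp) <;> (try rfl)
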